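-- pv_equiv track=rewrite | github.com/delomast/GSmhSim | eval_vcf.py | numAlleles
-- ===== SOURCE A (Python) =====
-- def numAlleles(genoList):
-- 	# build string representations of haplotypes
-- 	alleles1 = [""] * len(genoList[0])
-- 	alleles2 = [""] * len(genoList[0])
-- 	for g in genoList:
-- 		alleles1 = [alleles1[i] + g[i][0] for i in range(0, len(alleles1))]
-- 		alleles2 = [alleles2[i] + g[i][2] for i in range(0, len(alleles2))]
-- 	# count allele frequencies
-- 	af = {}
-- 	for a in alleles1 + alleles2:
-- 		af[a] = af.get(a, 0) + 1
--
-- 	# returning as string b/c is immediately being written to file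
-- 	return str(len(af))
-- ===== SOURCE B (Python) =====
-- def numAlleles(genoList):
-- 	# individual-major: collect each individual's two haplotypes as char tuples in one set
-- 	n = len(genoList[0])
-- 	haps = set()
-- 	for i in range(n):
-- 		haps.add(tuple(g[i][0] for g in genoList))
-- 		haps.add(tuple(g[i][2] for g in genoList))
-- 	# returning as string b/c is immediately being written to file
-- 	return str(len(haps))
-- ===== Notes on version B (the rewrite author's own statement) =====
-- stated objective: simpler
-- what changed: Inverts A's locus-major traversal (rebuilding two full lists of growing haplotype strings on every locus, then a frequency dict) into a single individual-major loop that collects each individual's two haplotypes as tuples in one set and returns the set's size.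
import Mathlib
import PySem

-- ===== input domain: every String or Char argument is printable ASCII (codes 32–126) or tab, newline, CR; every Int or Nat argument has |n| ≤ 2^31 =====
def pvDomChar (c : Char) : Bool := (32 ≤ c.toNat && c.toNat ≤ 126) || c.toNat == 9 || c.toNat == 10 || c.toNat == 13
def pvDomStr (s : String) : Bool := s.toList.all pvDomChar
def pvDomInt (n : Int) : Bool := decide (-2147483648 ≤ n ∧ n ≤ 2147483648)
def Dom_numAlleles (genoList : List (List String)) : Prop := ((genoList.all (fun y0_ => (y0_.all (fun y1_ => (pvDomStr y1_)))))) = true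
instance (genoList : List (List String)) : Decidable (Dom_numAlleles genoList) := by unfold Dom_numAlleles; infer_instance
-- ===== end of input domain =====

-- B replaces A's locus-major rebuild of two growing haplotype-string lists plus a frequency
-- dict by one individual-major pass collecting each individual's two haplotype tuples in a set
-- (objective: simpler; return value only, neither version mutates its argument).

-- total form of Python's g[i][j] (a one-character string); exact under Pre_ (indices in range)
def pvChar (g : List String) (i : Int) (j : Int) : Char :=
  (PySem.Str.pyGet? (PySem.List.pyGetD g i "") j).getD ' '

-- A's loop body: the two per-locus list comprehensions (alleles1, alleles2)
def pvStepA (p : List String × List String) (g : List String) : List String × List String :=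
  ((PySem.List.pyRange 0 (PySem.List.len p.1) 1).map
      (fun i => PySem.List.pyGetD p.1 i "" ++ (pvChar g i 0).toString),
   (PySem.List.pyRange 0 (PySem.List.len p.2) 1).map
      (fun i => PySem.List.pyGetD p.2 i "" ++ (pvChar g i 2).toString))

-- ===== PORT A =====
def numAlleles (genoList : List (List String)) : String :=
  let st := genoList.foldl pvStepA
    (List.replicate (PySem.List.pyGetD genoList 0 []).length "",
     List.replicate (PySem.List.pyGetD genoList 0 []).length "")
  let af := (st.1 ++ st.2).foldl
    (fun (d : PySem.Dict String Int) a => d.insert a (d.getD a 0 + 1)) PySem.Dict.empty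
  PySem.Int.toStr (PySem.Dict.size af)

-- ===== PORT B =====
def numAlleles_alt (genoList : List (List String)) : String :=
  let n := (PySem.List.pyGetD genoList 0 []).length
  let haps := (PySem.List.pyRange 0 (n : Int) 1).foldl
    (fun (s : PySem.Set (List Char)) i =>
      PySem.Set.add (PySem.Set.add s (genoList.map (fun g => pvChar g i 0)))
        (genoList.map (fun g => pvChar g i 2)))
    PySem.Set.empty
  PySem.Int.toStr (PySem.Set.len haps)

-- ===== PRECONDITION & SPEC =====
-- Pre_ excludes exactly the inputs where the Python A raises: an empty genoList (IndexError on
-- genoList[0]), a row shorter than the first row (IndexError on g[i]), or a genotype string of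
-- fewer than 3 characters among the first len(genoList[0]) entries of a row (IndexError on g[i][2]).
def Pre_numAlleles (genoList : List (List String)) : Prop :=
  genoList ≠ [] ∧ ∀ g ∈ genoList,
    (genoList.headD []).length ≤ g.length ∧
    ∀ s ∈ g.take (genoList.headD []).length, 3 ≤ s.toList.length
instance (genoList : List (List String)) : Decidable (Pre_numAlleles genoList) := by
  unfold Pre_numAlleles; infer_instance
def pvWitness_numAlleles : List (List String) := [["0|1", "1|1"], ["1|0", "1|1"]]
def Spec_numAlleles (genoList : List (List String)) (out : String) : Prop := out = numAlleles_alt genoList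
instance (genoList : List (List String)) (out : String) : Decidable (Spec_numAlleles genoList out) := by unfold Spec_numAlleles; infer_instance

-- ===== CLAIM (what is proved, stated in full; the proofs are below) =====
def Claim_equal_numAlleles : Prop := ∀ (genoList : List (List String)), Dom_numAlleles genoList → Pre_numAlleles genoList → Spec_numAlleles genoList (numAlleles genoList)

-- ===== LEMMAS AND PROOFS =====

-- the haplotype of individual i on strand j (chars in locus order)
def pvHap (genoList : List (List String)) (j : Int) (i : Int) : List Char :=
  genoList.map (fun g => pvChar g i j)

lemma pvOfList_inj : Function.Injective String.ofList := by
  intro l l' h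
  rw [String.ext_iff] at h; simpa using h

-- A's loop invariant: folding the loci extends each accumulated haplotype string per index
lemma pvFoldA (gs : List (List String)) (n : Nat) (F G : Int → List Char) :
    gs.foldl pvStepA
      ((PySem.List.pyRange 0 (n : Int) 1).map (fun i => String.ofList (F i)),
       (PySem.List.pyRange 0 (n : Int) 1).map (fun i => String.ofList (G i)))
    = ((PySem.List.pyRange 0 (n : Int) 1).map
         (fun i => String.ofList (F i ++ gs.map (fun g => pvChar g i 0))),
       (PySem.List.pyRange 0 (n : Int) 1).map
         (fun i => String.ofList (G i ++ gs.map (fun g => pvChar g i 2)))) := by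
  induction gs generalizing F G with
  | nil => simp
  | cons g gs ih =>
    rw [List.foldl_cons]
    have hstep :
        pvStepA
          ((PySem.List.pyRange 0 (n : Int) 1).map (fun i => String.ofList (F i)),
           (PySem.List.pyRange 0 (n : Int) 1).map (fun i => String.ofList (G i))) g
        = ((PySem.List.pyRange 0 (n : Int) 1).map
             (fun i => String.ofList (F i ++ [pvChar g i 0])),
           (PySem.List.pyRange 0 (n : Int) 1).map
             (fun i => String.ofList (G i ++ [pvChar g i 2]))) := by
      unfold pvStepA
      simp only [PySem.List.len_eq, List.length_map, PySem.List.length_pyRange_one, Int.sub_zero,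
        Int.toNat_natCast, Prod.mk.injEq]
      constructor <;>
      · apply List.map_congr_left
        intro i hi
        rw [PySem.List.mem_pyRange_one] at hi
        rw [PySem.List.pyGetD_map_pyRange_of_nonneg _ _ _ _ hi.1 hi.2]
        rw [String.ext_iff]; simp
    rw [hstep, ih]
    simp [List.append_assoc]

-- counting loop = Counter; its size is the number of distinct elements
lemma pvSizeCounter (l : List String) :
    PySem.Dict.size (l.foldl
      (fun (d : PySem.Dict String Int) a => d.insert a (d.getD a 0 + 1)) PySem.Dict.empty)
    = (PySem.Set.ofList l).length := by
  rw [PySem.Dict.foldl_insert_getD_add_one_eq_counter]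
  calc PySem.Dict.size (PySem.Dict.counter l)
      = (PySem.Dict.counter l).keys.length := by
        simp [PySem.Dict.size, PySem.Dict.keys]
    _ = _ := by rw [PySem.Dict.keys_counter]

-- deduplicating images of an injective map = mapping the deduplication
lemma pvOfList_map {α β : Type} [BEq α] [LawfulBEq α] [BEq β] [LawfulBEq β] (f : α → β)
    (hf : Function.Injective f) (l : List α) :
    PySem.Set.ofList (l.map f) = (PySem.Set.ofList l).map f := by
  have key : ∀ (l : List α) (s : List α),
      (l.map f).foldl PySem.Set.add (s.map f) = (l.foldl PySem.Set.add s).map f := by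
    intro l
    induction l with
    | nil => intro s; rfl
    | cons x l ih =>
      intro s
      have hadd : PySem.Set.add (s.map f) (f x) = (PySem.Set.add s x).map f := by
        by_cases h : x ∈ s
        · simp [PySem.Set.add, List.mem_map, h, hf.eq_iff]
        · simp [PySem.Set.add, List.mem_map, h, hf.eq_iff]
      simp [List.foldl_cons, hadd, ih]
  rw [PySem.Set.ofList_eq_foldl, PySem.Set.ofList_eq_foldl]
  simpa using key l []

-- B's loop = ofList of the interleaved haplotype list
lemma pvFoldB (idx : List Int) (H0 H2 : Int → List Char) (s : PySem.Set (List Char)) :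
    idx.foldl
      (fun (s : PySem.Set (List Char)) i => PySem.Set.add (PySem.Set.add s (H0 i)) (H2 i)) s
    = (idx.flatMap (fun i => [H0 i, H2 i])).foldl PySem.Set.add s := by
  induction idx generalizing s with
  | nil => rfl
  | cons i idx ih => simp [List.foldl, ih]

lemma pvSetLenCongr {α : Type} [BEq α] [LawfulBEq α] (l m : List α)
    (h : ∀ x, x ∈ l ↔ x ∈ m) :
    (PySem.Set.ofList l).length = (PySem.Set.ofList m).length := by
  refine List.Perm.length_eq ?_
  refine (List.perm_ext_iff_of_nodup (PySem.Set.nodup_ofList l) (PySem.Set.nodup_ofList m)).mpr ?_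
  intro x
  simp [PySem.Set.mem_ofList, h]

-- ===== VERDICT (by name: the statement is the Claim_ definition above) =====
theorem numAlleles_spec : Claim_equal_numAlleles := by
  intro genoList _ _
  unfold Spec_numAlleles numAlleles numAlleles_alt
  set n := (PySem.List.pyGetD genoList 0 []).length with hn
  have hrep : List.replicate n "" =
      (PySem.List.pyRange 0 (n : Int) 1).map (fun _ => String.ofList ([] : List Char)) := by
    rw [eq_comm, List.eq_replicate_iff]
    constructor
    · simp [PySem.List.length_pyRange_one]
    · intro b hb
      rcases List.mem_map.mp hb with ⟨i, _, h⟩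
      exact h.symm ▸ rfl
  rw [hrep, pvFoldA genoList n (fun _ => []) (fun _ => [])]
  simp only [List.nil_append]
  rw [pvSizeCounter]
  rw [pvFoldB]
  rw [show (PySem.Set.empty : PySem.Set (List Char)) = [] from rfl, ← PySem.Set.ofList_eq_foldl]
  have hmaps : (PySem.List.pyRange 0 (n : Int) 1).map
        (fun i => String.ofList (genoList.map (fun g => pvChar g i 0))) ++
      (PySem.List.pyRange 0 (n : Int) 1).map
        (fun i => String.ofList (genoList.map (fun g => pvChar g i 2)))
    = ((PySem.List.pyRange 0 (n : Int) 1).map (fun i => genoList.map (fun g => pvChar g i 0)) ++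
       (PySem.List.pyRange 0 (n : Int) 1).map
         (fun i => genoList.map (fun g => pvChar g i 2))).map String.ofList := by
    rw [List.map_append, List.map_map, List.map_map]; rfl
  rw [hmaps, pvOfList_map String.ofList pvOfList_inj, List.length_map]
  have hlen : ∀ (s : PySem.Set (List Char)), PySem.Set.len s = (s.length : Int) := by
    intro s; simp [PySem.Set.len]
  rw [hlen]
  congr 2
  apply pvSetLenCongr
  intro x
  simp only [List.mem_append, List.mem_map, List.mem_flatMap, List.mem_cons,
    List.not_mem_nil, or_false]
  constructor
  · rintro (⟨i, hi, h⟩ | ⟨i, hi, h⟩)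
    · exact ⟨i, hi, Or.inl h.symm⟩
    · exact ⟨i, hi, Or.inr h.symm⟩
  · rintro ⟨i, hi, (h | h)⟩
    · exact Or.inl ⟨i, hi, h.symm⟩
    · exact Or.inr ⟨i, hi, h.symm⟩
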